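-- pv_equiv track=rewrite | github.com/Ansi007/Codeforces-Solutions | MAIN/59A/59A.py | count
-- ===== SOURCE A (Python) =====
-- def count(st, x):
--     count = 0
--     if x == "upper":
--         for i in st:
--             if ord(i) in range(ord("A"), ord("Z")+1):
--                 count += 1
--     if x == "lower":
--         for i in st:
--             if ord(i) in range(ord("a"), ord("z")+1):
--                 count += 1
--     return count
-- ===== SOURCE B (Python) =====
-- def count(st, x):
--     freq = {}
--     for ch in st:
--         freq[ch] = freq.get(ch, 0) + 1
--     if x == "upper":
--         letters = "ABCDEFGHIJKLMNOPQRSTUVWXYZ"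
--     elif x == "lower":
--         letters = "abcdefghijklmnopqrstuvwxyz"
--     else:
--         return 0
--     return sum(freq.get(ch, 0) for ch in letters)
-- ===== Notes on version B (the rewrite author's own statement) =====
-- stated objective: alternative
-- what changed: B builds a character-frequency dict in one pass and then sums the counts of the fixed 26 upper- or lower-case ASCII letters, instead of range-testing every character of the string inside per-branch loops.
import Mathlib
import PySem

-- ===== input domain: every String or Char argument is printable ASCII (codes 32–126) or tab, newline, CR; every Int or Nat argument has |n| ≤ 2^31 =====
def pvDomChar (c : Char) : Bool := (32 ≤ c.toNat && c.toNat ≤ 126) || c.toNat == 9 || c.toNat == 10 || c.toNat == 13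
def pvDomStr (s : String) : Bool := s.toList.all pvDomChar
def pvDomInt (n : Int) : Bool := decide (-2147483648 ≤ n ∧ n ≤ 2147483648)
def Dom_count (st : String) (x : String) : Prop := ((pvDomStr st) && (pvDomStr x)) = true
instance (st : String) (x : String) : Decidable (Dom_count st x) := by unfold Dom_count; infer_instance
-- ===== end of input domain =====

-- B maintains a frequency dict of the whole string and sums the counts of the 26 fixed
-- ASCII letters of the requested case; same result, different traversal (alternative).

-- ===== PORT A =====
def count (st : String) (x : String) : Int :=
  let c0 : Int := 0
  let c1 : Int :=
    if x == "upper" then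
      st.toList.foldl (fun acc i => if 65 ≤ i.toNat && i.toNat ≤ 90 then acc + 1 else acc) c0
    else c0
  let c2 : Int :=
    if x == "lower" then
      st.toList.foldl (fun acc i => if 97 ≤ i.toNat && i.toNat ≤ 122 then acc + 1 else acc) c1
    else c1
  c2

-- ===== PORT B =====
def count_alt (st : String) (x : String) : Int :=
  let freq : PySem.Dict Char Int :=
    st.toList.foldl (fun d ch => d.insert ch (d.getD ch 0 + 1)) PySem.Dict.empty
  if x == "upper" then
    ("ABCDEFGHIJKLMNOPQRSTUVWXYZ".toList.foldl (fun acc ch => acc + freq.getD ch 0) 0)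
  else if x == "lower" then
    ("abcdefghijklmnopqrstuvwxyz".toList.foldl (fun acc ch => acc + freq.getD ch 0) 0)
  else 0

-- ===== PRECONDITION & SPEC =====
def Spec_count (st : String) (x : String) (out : Int) : Prop := out = count_alt st x
instance (st : String) (x : String) (out : Int) : Decidable (Spec_count st x out) := by unfold Spec_count; infer_instance

-- ===== CLAIM (what is proved, stated in full; the proofs are below) =====
def Claim_equal_count : Prop := ∀ (st : String) (x : String), Dom_count st x → Spec_count st x (count st x)

-- ===== LEMMAS AND PROOFS =====

-- A-side loop counts matches of the (Bool) predicate.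
theorem foldl_count_pred (p : Char → Bool) (l : List Char) (a : Int) :
    l.foldl (fun acc i => if p i then acc + 1 else acc) a
      = a + ((l.filter p).length : Int) := by
  induction l generalizing a with
  | nil => simp
  | cons c t ih =>
    by_cases h : p c <;> (simp [h, ih]; try ring)

-- B-side loop sums the multiplicities of the letters.
theorem foldl_sum_count (letters l : List Char) (a : Int) :
    letters.foldl (fun acc ch => acc + ((l.count ch : Nat) : Int)) a
      = a + (letters.map (fun ch => ((l.count ch : Nat) : Int))).sum := by
  exact PySem.List.foldl_add _ _ _

-- Summing per-letter multiplicities over a duplicate-free letter list counts the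
-- characters of l that lie in the letter list.
theorem sum_ite_eq_count (c : Char) (letters : List Char) :
    (letters.map (fun ch => if ch = c then (1 : Int) else 0)).sum = ((letters.count c : Nat) : Int) := by
  induction letters with
  | nil => simp
  | cons d ds ihd =>
    by_cases h : d = c
    · subst h
      simp only [List.map_cons, List.sum_cons, List.count_cons_self, ihd]
      push_cast; ring
    · rw [List.count_cons_of_ne h]
      simp [h, ihd]

-- Summing per-letter multiplicities over a duplicate-free letter list counts the
-- characters of l that lie in the letter list.
theorem sum_counts_eq_filter_length (letters : List Char) (hnd : letters.Nodup) (l : List Char) :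
    (letters.map (fun ch => ((l.count ch : Nat) : Int))).sum
      = ((l.filter (fun c => decide (c ∈ letters))).length : Int) := by
  induction l with
  | nil => simp
  | cons c t ih =>
    rw [List.filter_cons]
    by_cases hc : c ∈ letters
    · have hrw : letters.map (fun ch => (((c :: t).count ch : Nat) : Int))
          = letters.map (fun ch => ((t.count ch : Nat) : Int) + if ch = c then 1 else 0) := by
        apply List.map_congr_left
        intro ch _
        by_cases h : ch = c
        · subst h; rw [List.count_cons_self]; push_cast; simp
        · rw [List.count_cons_of_ne (fun hh => h hh.symm)]; simp [h]
      rw [hrw, List.sum_map_add, sum_ite_eq_count, List.count_eq_one_of_mem hnd hc, ih]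
      simp [hc]
    · have h1 : letters.map (fun ch => (((c :: t).count ch : Nat) : Int))
          = letters.map (fun ch => ((t.count ch : Nat) : Int)) := by
        apply List.map_congr_left
        intro ch hch
        have hne : c ≠ ch := fun h => hc (by rw [h]; exact hch)
        rw [List.count_cons_of_ne hne]
      simp [hc, h1, ih]

-- Char equality from code-point equality
theorem char_eq_of_toNat_eq {c d : Char} (h : c.toNat = d.toNat) : c = d := by
  apply Char.ext
  exact UInt32.toNat_inj.mp h

theorem mem_of_toNat_mem (c : Char) (letters : List Char)
    (h : c.toNat ∈ letters.map Char.toNat) : c ∈ letters := by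
  induction letters with
  | nil => simp at h
  | cons d ds ih =>
    simp only [List.map_cons, List.mem_cons] at h
    rcases h with h | h
    · rw [char_eq_of_toNat_eq h]
      exact List.mem_cons_self
    · exact List.mem_cons_of_mem _ (ih h)

-- membership in the literal letter lists ↔ the code-point range test
theorem mem_upper_iff (c : Char) :
    (decide (c ∈ "ABCDEFGHIJKLMNOPQRSTUVWXYZ".toList)) = (65 ≤ c.toNat && c.toNat ≤ 90) := by
  by_cases hb : 65 ≤ c.toNat ∧ c.toNat ≤ 90
  · obtain ⟨h1, h2⟩ := hb
    have hm : c ∈ "ABCDEFGHIJKLMNOPQRSTUVWXYZ".toList := by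
      apply mem_of_toNat_mem
      rw [show ("ABCDEFGHIJKLMNOPQRSTUVWXYZ".toList).map Char.toNat
        = [65,66,67,68,69,70,71,72,73,74,75,76,77,78,79,80,81,82,83,84,85,86,87,88,89,90] from rfl]
      interval_cases h : c.toNat <;> decide
    rw [decide_eq_true hm]
    symm
    simp [h1, h2]
  · have hnm : c ∉ "ABCDEFGHIJKLMNOPQRSTUVWXYZ".toList := by
      intro hmem
      have := List.mem_map_of_mem (f := Char.toNat) hmem
      rw [show ("ABCDEFGHIJKLMNOPQRSTUVWXYZ".toList).map Char.toNat
        = [65,66,67,68,69,70,71,72,73,74,75,76,77,78,79,80,81,82,83,84,85,86,87,88,89,90] from rfl] at this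
      simp only [List.mem_cons, List.not_mem_nil, or_false] at this
      omega
    have hF : (65 ≤ c.toNat && c.toNat ≤ 90) = false := by
      simp only [Bool.and_eq_false_iff, decide_eq_false_iff_not]
      omega
    rw [decide_eq_false hnm, hF]

theorem mem_lower_iff (c : Char) :
    (decide (c ∈ "abcdefghijklmnopqrstuvwxyz".toList)) = (97 ≤ c.toNat && c.toNat ≤ 122) := by
  by_cases hb : 97 ≤ c.toNat ∧ c.toNat ≤ 122
  · obtain ⟨h1, h2⟩ := hb
    have hm : c ∈ "abcdefghijklmnopqrstuvwxyz".toList := by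
      apply mem_of_toNat_mem
      rw [show ("abcdefghijklmnopqrstuvwxyz".toList).map Char.toNat
        = [97,98,99,100,101,102,103,104,105,106,107,108,109,110,111,112,113,114,115,116,117,118,119,120,121,122] from rfl]
      interval_cases h : c.toNat <;> decide
    rw [decide_eq_true hm]
    symm
    simp [h1, h2]
  · have hnm : c ∉ "abcdefghijklmnopqrstuvwxyz".toList := by
      intro hmem
      have := List.mem_map_of_mem (f := Char.toNat) hmem
      rw [show ("abcdefghijklmnopqrstuvwxyz".toList).map Char.toNat
        = [97,98,99,100,101,102,103,104,105,106,107,108,109,110,111,112,113,114,115,116,117,118,119,120,121,122] from rfl] at this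
      simp only [List.mem_cons, List.not_mem_nil, or_false] at this
      omega
    have hF : (97 ≤ c.toNat && c.toNat ≤ 122) = false := by
      simp only [Bool.and_eq_false_iff, decide_eq_false_iff_not]
      omega
    rw [decide_eq_false hnm, hF]

theorem side_eq (letters : List Char) (hnd : letters.Nodup) (p : Char → Bool)
    (hp : ∀ c, (decide (c ∈ letters)) = p c) (l : List Char) :
    letters.foldl (fun acc ch =>
        acc + (l.foldl (fun d ch' => d.insert ch' (d.getD ch' 0 + 1)) PySem.Dict.empty).getD ch 0) 0
      = l.foldl (fun acc i => if p i then acc + 1 else acc) (0 : Int) := by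
  have hfreq : ∀ ch, (l.foldl (fun d ch' => d.insert ch' (d.getD ch' 0 + 1))
      PySem.Dict.empty).getD ch 0 = ((l.count ch : Nat) : Int) := by
    intro ch
    rw [PySem.Dict.getD_foldl_insert_add_one]
    simp
  have h1 : letters.foldl (fun acc ch =>
      acc + (l.foldl (fun d ch' => d.insert ch' (d.getD ch' 0 + 1)) PySem.Dict.empty).getD ch 0) 0
      = letters.foldl (fun acc ch => acc + ((l.count ch : Nat) : Int)) 0 := by
    apply PySem.List.foldl_congr_mem
    intro a c _
    rw [hfreq]
  rw [h1, foldl_sum_count, sum_counts_eq_filter_length letters hnd l,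
    foldl_count_pred p l 0]
  have : l.filter (fun c => decide (c ∈ letters)) = l.filter p := by
    apply List.filter_congr
    intro c _
    exact hp c
  rw [this]

-- ===== VERDICT (by name: the statement is the Claim_ definition above) =====
theorem count_spec : Claim_equal_count := by
  intro st x _
  unfold Spec_count count count_alt
  by_cases hu : x == "upper"
  · have hl : (x == "lower") = false := by simp_all
    simp only [hu, hl, if_true, if_false, Bool.false_eq_true]
    exact (side_eq _ (by decide) _ mem_upper_iff st.toList).symm
  · by_cases hl : x == "lower"
    · simp only [Bool.not_eq_true] at hu
      simp only [hu, hl, if_true, Bool.false_eq_true, if_false]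
      exact (side_eq _ (by decide) _ mem_lower_iff st.toList).symm
    · simp_all
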